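-- pv_equiv track=rewrite | github.com/Nonso-Duaka/evovir | scripts/split_virus_hosts.py | is_non_vertebrate_by_taxonomy
-- ===== SOURCE A (Python) =====
-- NON_VERTEBRATE_TAXONOMY = {
--     # Bacteriophages
--     "caudoviricetes",       # tailed bacteriophages (vast majority of phages)
--     "microviridae",         # small ssDNA bacteriophages
--     "inoviridae",           # filamentous bacteriophages
--     "tectiviridae",         # bacteriophages
--     "corticoviridae",       # bacteriophages
--     "plasmaviridae",        # mycoplasma phages
--     "leviviricetes",        # RNA bacteriophages (Leviviridae etc.)
--     "cystoviridae",         # dsRNA bacteriophages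
--     # Plant viruses
--     "geminiviridae",        # plant viruses (begomoviruses, mastreviruses, etc.)
--     "nanoviridae",          # plant viruses
--     "caulimoviridae",       # plant pararetroviruses
--     "virgaviridae",         # plant viruses (TMV-like)
--     "bromoviridae",         # plant viruses
--     "closteroviridae",      # plant viruses
--     "potyviridae",          # plant viruses
--     "tombusviridae",        # plant viruses
--     "luteoviridae",         # plant viruses
--     "partitiviridae",       # plant/fungal viruses
--     "tymoviridae",          # plant viruses
--     "secoviridae",          # plant viruses
--     "solemoviridae",        # plant viruses
--     "kitaviridae",          # plant viruses
--     "fimoviridae",          # plant viruses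
--     "tospoviridae",         # plant viruses (thrips-transmitted)
--     "betaflexiviridae",     # plant viruses
--     "alphaflexiviridae",    # plant viruses
--     # Fungal viruses
--     "chrysoviridae",        # fungal viruses
--     "totiviridae",          # fungal/protozoan viruses
--     "hypoviridae",          # fungal viruses
--     "megabirnaviridae",     # fungal viruses
--     "quadriviridae",        # fungal viruses
--     # Archaeal viruses
--     "ligamenvirales",       # archaeal viruses
--     "rudiviridae",          # archaeal viruses
--     "lipothrixviridae",     # archaeal viruses
--     "fuselloviridae",       # archaeal viruses
--     "bicaudaviridae",       # archaeal viruses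
--     "ampullaviridae",       # archaeal viruses
--     "globuloviridae",       # archaeal viruses
--     "guttaviridae",         # archaeal viruses
--     "turriviridae",         # archaeal viruses
--     # Insect-specific viruses
--     "baculoviridae",        # insect viruses
--     "nudiviridae",          # insect viruses
--     "polydnaviridae",       # insect viruses (parasitoid wasps)
--     "polydnaviriformidae",  # parasitoid wasp viruses
--     "bracoviriform",        # braconid wasp viruses
--     "iflaviridae",          # insect viruses
--     "dicistroviridae",      # insect viruses
--     "bidnaviridae",         # insect viruses (Bombyx mori densovirus)
--     "genomoviridae",        # fungal/environmental ssDNA viruses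
--     # Diatom/algal viruses
--     "bacilladnaviridae",    # diatom viruses
--     "phycodnaviridae",      # algal viruses
--     # Arthropod-associated ssDNA viruses
--     "smacoviridae",         # arthropod-associated circular viruses
--     # Giant viruses (amoeba/protist hosts)
--     "nucleocytoviricota",   # giant viruses (Mimivirus, Marseillevirus, etc.)
--     # Additional archaeal viruses
--     "pleolipoviridae",      # archaeal viruses
--     "haloruvirales",        # archaeal viruses
--     # Plant virus satellites
--     "tolecusatellitidae",   # begomovirus satellites (plant)
-- }
--
-- NON_VERTEBRATE_ORGANISM = {
--     "phage", "bacteriophage",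
-- }
--
-- def is_non_vertebrate_by_taxonomy(taxonomy: str, organism: str) -> bool:
--     """Check if the virus taxonomy or organism name definitively indicates
--     a non-vertebrate host (bacteriophage, plant virus, archaeal virus, etc.)."""
--     tax_lower = taxonomy.lower()
--     org_lower = organism.lower()
--
--     # Check organism name for phage keywords
--     for kw in NON_VERTEBRATE_ORGANISM:
--         if kw in org_lower:
--             return True
--
--     # Check taxonomy for known non-vertebrate viral clades
--     for clade in NON_VERTEBRATE_TAXONOMY:
--         if clade in tax_lower:
--             return True
--
--     return False
-- ===== SOURCE B (Python) =====
-- NON_VERT_TAX_KWS = (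
--     "caudoviricetes", "microviridae", "inoviridae", "tectiviridae",
--     "corticoviridae", "plasmaviridae", "leviviricetes", "cystoviridae",
--     "geminiviridae", "nanoviridae", "caulimoviridae", "virgaviridae",
--     "bromoviridae", "closteroviridae", "potyviridae", "tombusviridae",
--     "luteoviridae", "partitiviridae", "tymoviridae", "secoviridae",
--     "solemoviridae", "kitaviridae", "fimoviridae", "tospoviridae",
--     "betaflexiviridae", "alphaflexiviridae", "chrysoviridae", "totiviridae",
--     "hypoviridae", "megabirnaviridae", "quadriviridae", "ligamenvirales",
--     "rudiviridae", "lipothrixviridae", "fuselloviridae", "bicaudaviridae",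
--     "ampullaviridae", "globuloviridae", "guttaviridae", "turriviridae",
--     "baculoviridae", "nudiviridae", "polydnaviridae", "polydnaviriformidae",
--     "bracoviriform", "iflaviridae", "dicistroviridae", "bidnaviridae",
--     "genomoviridae", "bacilladnaviridae", "phycodnaviridae", "smacoviridae",
--     "nucleocytoviricota", "pleolipoviridae", "haloruvirales",
--     "tolecusatellitidae",
-- )
--
-- NON_VERT_ORG_KWS = ("phage", "bacteriophage")
--
--
-- def _hits(text, kws):
--     low = text.lower()
--     # single left-to-right scan: at each position, test the whole keyword
--     # tuple at once with startswith
--     return any(low.startswith(kws, i) for i in range(len(low)))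
--
--
-- def is_non_vertebrate_by_taxonomy(taxonomy: str, organism: str) -> bool:
--     """Check if the virus taxonomy or organism name definitively indicates
--     a non-vertebrate host (bacteriophage, plant virus, archaeal virus, etc.)."""
--     return _hits(organism, NON_VERT_ORG_KWS) or _hits(taxonomy, NON_VERT_TAX_KWS)
-- ===== Notes on version B (the rewrite author's own statement) =====
-- stated objective: alternative
-- what changed: Instead of looping over each keyword and running a separate substring search per keyword, B makes a single left-to-right scan over each lowercased string and tests the whole keyword tuple at each position with str.startswith(tuple, i).
import Mathlib
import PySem

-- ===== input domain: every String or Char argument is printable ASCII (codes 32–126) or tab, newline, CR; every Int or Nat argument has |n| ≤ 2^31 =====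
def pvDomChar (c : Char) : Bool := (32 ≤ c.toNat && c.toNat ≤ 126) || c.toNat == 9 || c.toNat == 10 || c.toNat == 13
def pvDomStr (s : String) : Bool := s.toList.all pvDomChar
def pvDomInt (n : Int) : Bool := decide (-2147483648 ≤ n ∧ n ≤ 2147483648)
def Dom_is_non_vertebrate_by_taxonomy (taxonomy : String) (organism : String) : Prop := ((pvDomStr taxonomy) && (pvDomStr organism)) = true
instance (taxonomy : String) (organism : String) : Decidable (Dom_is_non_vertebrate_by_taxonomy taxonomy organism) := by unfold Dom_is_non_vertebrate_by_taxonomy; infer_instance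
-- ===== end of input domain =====

-- B replaces A's per-keyword substring loops by one positional scan per string that
-- tests all keywords at each position (objective: alternative; same outputs).

-- ===== PORT A =====
-- the two constant keyword collections of A (Python set literals; iteration order
-- is irrelevant since the loops only ever return True)
def NON_VERTEBRATE_TAXONOMY : List String :=
  ["caudoviricetes", "microviridae", "inoviridae", "tectiviridae",
   "corticoviridae", "plasmaviridae", "leviviricetes", "cystoviridae",
   "geminiviridae", "nanoviridae", "caulimoviridae", "virgaviridae",
   "bromoviridae", "closteroviridae", "potyviridae", "tombusviridae",
   "luteoviridae", "partitiviridae", "tymoviridae", "secoviridae",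
   "solemoviridae", "kitaviridae", "fimoviridae", "tospoviridae",
   "betaflexiviridae", "alphaflexiviridae", "chrysoviridae", "totiviridae",
   "hypoviridae", "megabirnaviridae", "quadriviridae", "ligamenvirales",
   "rudiviridae", "lipothrixviridae", "fuselloviridae", "bicaudaviridae",
   "ampullaviridae", "globuloviridae", "guttaviridae", "turriviridae",
   "baculoviridae", "nudiviridae", "polydnaviridae", "polydnaviriformidae",
   "bracoviriform", "iflaviridae", "dicistroviridae", "bidnaviridae",
   "genomoviridae", "bacilladnaviridae", "phycodnaviridae", "smacoviridae",
   "nucleocytoviricota", "pleolipoviridae", "haloruvirales",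
   "tolecusatellitidae"]

def NON_VERTEBRATE_ORGANISM : List String := ["phage", "bacteriophage"]

-- A's 'for kw in …: if kw in s: return True' early-return loop
def aKwLoop (kws : List String) (s : String) : Bool :=
  match kws with
  | [] => false
  | kw :: rest => if PySem.Str.isIn kw s then true else aKwLoop rest s

def is_non_vertebrate_by_taxonomy (taxonomy : String) (organism : String) : Bool :=
  let tax_lower := PySem.Str.lower taxonomy
  let org_lower := PySem.Str.lower organism
  if aKwLoop NON_VERTEBRATE_ORGANISM org_lower then true
  else if aKwLoop NON_VERTEBRATE_TAXONOMY tax_lower then true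
  else false

-- ===== PORT B =====
-- B's constants, as in Source B (same literals)
def NON_VERT_TAX_KWS : List (List Char) := NON_VERTEBRATE_TAXONOMY.map String.toList
def NON_VERT_ORG_KWS : List (List Char) := ["phage".toList, "bacteriophage".toList]

-- Source B's 'any(low.startswith(kws, i) for i in range(len(low)))': scan positions
-- left to right (= suffixes of the char list); at each one test every keyword as
-- a prefix, exactly what startswith with a tuple does.
def bScan (kws : List (List Char)) : List Char → Bool
  | [] => false
  | c :: rest => kws.any (fun p => List.isPrefixOf p (c :: rest)) || bScan kws rest

def bHits (text : String) (kws : List (List Char)) : Bool :=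
  bScan kws (PySem.Str.lower text).toList

def is_non_vertebrate_by_taxonomy_alt (taxonomy : String) (organism : String) : Bool :=
  bHits organism NON_VERT_ORG_KWS || bHits taxonomy NON_VERT_TAX_KWS

-- ===== PRECONDITION & SPEC =====
def Spec_is_non_vertebrate_by_taxonomy (taxonomy : String) (organism : String) (out : Bool) : Prop := out = is_non_vertebrate_by_taxonomy_alt taxonomy organism
instance (taxonomy : String) (organism : String) (out : Bool) : Decidable (Spec_is_non_vertebrate_by_taxonomy taxonomy organism out) := by unfold Spec_is_non_vertebrate_by_taxonomy; infer_instance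

-- ===== CLAIM (what is proved, stated in full; the proofs are below) =====
def Claim_equal_is_non_vertebrate_by_taxonomy : Prop := ∀ (taxonomy : String) (organism : String), Dom_is_non_vertebrate_by_taxonomy taxonomy organism → Spec_is_non_vertebrate_by_taxonomy taxonomy organism (is_non_vertebrate_by_taxonomy taxonomy organism)

-- ===== LEMMAS AND PROOFS =====

-- A's early-return loop is an 'any' over the keywords
theorem aKwLoop_eq_any (kws : List String) (s : String) :
    aKwLoop kws s = kws.any (fun kw => PySem.Str.isIn kw s) := by
  induction kws with
  | nil => rfl
  | cons kw rest ih =>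
    simp only [aKwLoop, List.any_cons, ih]
    cases PySem.Str.isIn kw s <;> simp

-- B's positional scan finds exactly the keywords that occur as an infix
-- (all keywords are nonempty, so the end-of-string position needs no test)
theorem bScan_iff (kws : List (List Char)) (h : [] ∉ kws) (s : List Char) :
    bScan kws s = true ↔ ∃ p ∈ kws, p <:+: s := by
  induction s with
  | nil =>
    simp only [bScan]
    constructor
    · intro hx; exact absurd hx (by simp)
    · rintro ⟨p, hp, hinf⟩
      exact absurd (List.infix_nil.mp hinf ▸ hp) h
  | cons c rest ih =>
    simp only [bScan, Bool.or_eq_true, List.any_eq_true, ih,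
      List.isPrefixOf_iff_prefix, List.infix_cons_iff]
    constructor
    · rintro (⟨p, hp, hpre⟩ | ⟨p, hp, hinf⟩)
      · exact ⟨p, hp, Or.inl hpre⟩
      · exact ⟨p, hp, Or.inr hinf⟩
    · rintro ⟨p, hp, hpre | hinf⟩
      · exact Or.inl ⟨p, hp, hpre⟩
      · exact Or.inr ⟨p, hp, hinf⟩

-- the two per-string tests agree
theorem any_isIn_eq_bScan (kws : List String) (h : [] ∉ kws.map String.toList) (s : String) :
    kws.any (fun kw => PySem.Str.isIn kw s) = bScan (kws.map String.toList) s.toList := by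
  rw [Bool.eq_iff_iff]
  rw [bScan_iff _ h]
  simp only [List.any_eq_true, PySem.Str.isIn_iff_infix, List.mem_map]
  constructor
  · rintro ⟨kw, hkw, hinf⟩; exact ⟨kw.toList, ⟨kw, hkw, rfl⟩, hinf⟩
  · rintro ⟨p, ⟨kw, hkw, rfl⟩, hinf⟩; exact ⟨kw, hkw, hinf⟩

-- ===== VERDICT (by name: the statement is the Claim_ definition above) =====
theorem is_non_vertebrate_by_taxonomy_spec : Claim_equal_is_non_vertebrate_by_taxonomy := by
  intro taxonomy organism _
  show is_non_vertebrate_by_taxonomy taxonomy organism = is_non_vertebrate_by_taxonomy_alt taxonomy organism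
  have horg : ([] : List Char) ∉ NON_VERTEBRATE_ORGANISM.map String.toList := by decide
  have htax : ([] : List Char) ∉ NON_VERTEBRATE_TAXONOMY.map String.toList := by decide
  have h1 := any_isIn_eq_bScan NON_VERTEBRATE_ORGANISM horg (PySem.Str.lower organism)
  have h2 := any_isIn_eq_bScan NON_VERTEBRATE_TAXONOMY htax (PySem.Str.lower taxonomy)
  have e1 : NON_VERT_ORG_KWS = NON_VERTEBRATE_ORGANISM.map String.toList := by rfl
  have e2 : NON_VERT_TAX_KWS = NON_VERTEBRATE_TAXONOMY.map String.toList := by rfl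
  simp only [is_non_vertebrate_by_taxonomy, is_non_vertebrate_by_taxonomy_alt, bHits,
    aKwLoop_eq_any, h1, h2, e1, e2]
  cases bScan (NON_VERTEBRATE_ORGANISM.map String.toList) (PySem.Str.lower organism).toList <;>
    cases bScan (NON_VERTEBRATE_TAXONOMY.map String.toList) (PySem.Str.lower taxonomy).toList <;> simp
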